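-- pv_equiv track=rewrite | github.com/nishio/atcoder | arc112/c.py | solve
-- ===== SOURCE A (Python) =====
-- def solve(N, PS):
--     from collections import defaultdict
--     children = defaultdict(list)
--     for i in range(1, N):
--         children[PS[i]].append(i)
--
--     cost = {}
--     sign = {}
--     for i in reversed(range(N)):
--         if len(children[i]) == 0:
--             cost[i] = 1
--             sign[i] = -1
--         elif len(children[i]) == 1:
--             cost[i] = cost[children[i][0]] + 1
--             sign[i] = sign[children[i][0]] * -1
--         else:
--             # choise
--             cs = [(cost[x], sign[x]) for x in children[i]]
--             # debug(i, cs, msg=":i,cs")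
--             rc = 0
--             rs = 1
--             for c, s in sorted(cs):  # (1)
--                 if s == 1 and c < 0:
--                     rc += rs * c
--             for c, s in sorted(cs):
--                 if s == -1:
--                     rc += rs * c
--                     rs *= -1
--             for c, s in sorted(cs):
--                 if s == 1 and c >= 0:
--                     rc += rs * c
--             cost[i] = rc + 1
--             sign[i] = -rs  # (2)
--
--     # debug(cost, sign, msg=":cost, sign")
--     return (N + cost[0]) // 2
-- ===== SOURCE B (Python) =====
-- def merge(pairs):
--     rc = sum(c for c, s in pairs if s == 1 and c < 0)
--     rs = 1
--     for c in sorted(c for c, s in pairs if s == -1):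
--         rc += rs * c
--         rs = -rs
--     rc += rs * sum(c for c, s in pairs if s == 1 and c >= 0)
--     return rc + 1, -rs
--
-- def solve(N, PS):
--     from collections import defaultdict
--     children = defaultdict(list)
--     for i in range(1, N):
--         children[PS[i]].append(i)
--     val = {}
--     stack = [(0, False)]
--     while stack:
--         v, done = stack.pop()
--         if done:
--             val[v] = merge([val[w] for w in children[v]])
--         else:
--             stack.append((v, True))
--             for w in children[v]:
--                 stack.append((w, False))
--     return (N + val[0][0]) // 2
-- ===== Notes on version B (the rewrite author's own statement) =====
-- stated objective: alternative
-- what changed: B replaces A's reversed(range(N)) sweep that evaluates every node with per-arity branches and three passes over the fully sorted (cost,sign) pairs by an explicit-stack post-order DFS from the root that evaluates only the subtree reachable from node 0, with one uniform closed-form merge (sum of negative plus-sign costs, alternating fold over the sorted minus-sign costs, signed sum of the rest).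
import Mathlib
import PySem

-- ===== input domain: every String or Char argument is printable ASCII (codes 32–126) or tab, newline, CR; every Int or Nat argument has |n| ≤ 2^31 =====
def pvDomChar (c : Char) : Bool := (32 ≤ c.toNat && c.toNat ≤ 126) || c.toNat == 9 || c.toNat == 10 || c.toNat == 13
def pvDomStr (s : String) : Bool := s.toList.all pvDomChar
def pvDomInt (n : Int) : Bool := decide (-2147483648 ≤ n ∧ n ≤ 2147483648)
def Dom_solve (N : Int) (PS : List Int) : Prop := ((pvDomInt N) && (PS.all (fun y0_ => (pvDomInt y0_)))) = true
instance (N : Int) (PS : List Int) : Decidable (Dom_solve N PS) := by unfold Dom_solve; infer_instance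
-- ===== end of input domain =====

-- B replaces A's reversed(range(N)) sweep over all nodes (per-arity branches, three passes over
-- the fully sorted (cost,sign) pairs) by an explicit-stack post-order DFS from the root that
-- evaluates only the subtree of node 0 with one uniform closed-form merge (objective: alternative).

-- ===== PORT A =====
-- children[PS[i]].append(i) on the defaultdict (Source A and Source B build the children lists with
-- this identical statement, so both ports share this one helper)
def buildA (PS : List Int) (d : PySem.Dict Int (List Int)) (i : Int) : PySem.Dict Int (List Int) :=
  let p := PySem.List.pyGetD PS i 0
  d.insert p (d.getD p [] ++ [i])

-- one iteration of A's `for i in reversed(range(N))` body over the (cost, sign) dicts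
def stepA (children : PySem.Dict Int (List Int)) (cs : PySem.Dict Int Int × PySem.Dict Int Int)
    (i : Int) : PySem.Dict Int Int × PySem.Dict Int Int :=
  let ch := children.getD i []
  if ch.length = 0 then
    (cs.1.insert i 1, cs.2.insert i (-1))
  else if ch.length = 1 then
    let c0 := PySem.List.pyGetD ch 0 0
    (cs.1.insert i (cs.1.getD c0 0 + 1), cs.2.insert i (cs.2.getD c0 0 * (-1)))
  else
    let pairs := ch.map (fun x => (cs.1.getD x 0, cs.2.getD x 0))
    let a1 := (PySem.List.sorted2 pairs (·.1) (·.2)).foldl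
      (fun (a : Int × Int) p => if p.2 = 1 ∧ p.1 < 0 then (a.1 + a.2 * p.1, a.2) else a) (0, 1)
    let a2 := (PySem.List.sorted2 pairs (·.1) (·.2)).foldl
      (fun (a : Int × Int) p => if p.2 = -1 then (a.1 + a.2 * p.1, a.2 * (-1)) else a) a1
    let a3 := (PySem.List.sorted2 pairs (·.1) (·.2)).foldl
      (fun (a : Int × Int) p => if p.2 = 1 ∧ 0 ≤ p.1 then (a.1 + a.2 * p.1, a.2) else a) a2
    (cs.1.insert i (a3.1 + 1), cs.2.insert i (-a3.2))

def solve (N : Int) (PS : List Int) : Int :=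
  let children := (PySem.List.pyRange 1 N 1).foldl (buildA PS) PySem.Dict.empty
  let fin := ((PySem.List.pyRange 0 N 1).reverse).foldl (stepA children)
    (PySem.Dict.empty, PySem.Dict.empty)
  PySem.Int.floordiv (N + fin.1.getD 0 0) 2

-- ===== PORT B =====
-- helper `merge` of Source B: closed-form merge of the children's (cost, sign) pairs
def mergeB (cs : List (Int × Int)) : Int × Int :=
  let neg := PySem.List.sorted ((cs.filter (fun p => p.2 = -1)).map (·.1)) (fun c => c) false
  let rc0 := ((cs.filter (fun p => p.2 = 1 ∧ p.1 < 0)).map (·.1)).sum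
  let a := neg.foldl (fun (a : Int × Int) c => (a.1 + a.2 * c, -a.2)) (rc0, 1)
  let rc := a.1 + a.2 * ((cs.filter (fun p => p.2 = 1 ∧ 0 ≤ p.1)).map (·.1)).sum
  (rc + 1, -a.2)

-- a 'done' pop of Source B's while loop: val[v] = merge([val[w] for w in children[v]])
-- (val[w] is an exact lookup in Python; the (0,0) default is never read inside Pre_)
def stepDone (children : PySem.Dict Int (List Int)) (val : PySem.Dict Int (Int × Int))
    (v : Int) : PySem.Dict Int (Int × Int) :=
  val.insert v (mergeB ((children.getD v []).map (fun w => val.getD w (0, 0))))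

-- Source B's `while stack:` loop; head of the list is the top of the stack; the fuel 2*N+2
-- only makes the recursion total and is proved sufficient inside Pre_
def runB (children : PySem.Dict Int (List Int)) :
    Nat → List (Int × Bool) → PySem.Dict Int (Int × Int) → PySem.Dict Int (Int × Int)
  | _, [], val => val
  | 0, _ :: _, val => val
  | f+1, (v, done) :: rest, val =>
    if done then runB children f rest (stepDone children val v)
    else runB children f
      (((children.getD v []).reverse.map (fun w => (w, false))) ++ (v, true) :: rest) val

def solve_alt (N : Int) (PS : List Int) : Int :=
  let children := (PySem.List.pyRange 1 N 1).foldl (buildA PS) PySem.Dict.empty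
  let val := runB children (2 * N.toNat + 2) [(0, false)] PySem.Dict.empty
  PySem.Int.floordiv (N + (val.getD 0 (0, 0)).1) 2

-- ===== PRECONDITION & SPEC =====
-- Pre_ is exactly where A returns: N ≥ 1 (else KeyError on cost[0]), PS long enough for the
-- indices A reads (else IndexError), and no node j whose stated parent lies in [j, N)
-- (else the reversed-order loop reads a cost entry not yet computed: KeyError).
def Pre_solve (N : Int) (PS : List Int) : Prop :=
  1 ≤ N ∧ (N = 1 ∨ N ≤ (PS.length : Int)) ∧
  ∀ j ∈ PySem.List.pyRange 1 N 1,
    PySem.List.pyGetD PS j 0 < j ∨ N ≤ PySem.List.pyGetD PS j 0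
instance (N : Int) (PS : List Int) : Decidable (Pre_solve N PS) := by
  unfold Pre_solve; infer_instance

def pvWitness_solve : Int × List Int := (3, [0, 0, 1])

def Spec_solve (N : Int) (PS : List Int) (out : Int) : Prop := out = solve_alt N PS
instance (N : Int) (PS : List Int) (out : Int) : Decidable (Spec_solve N PS out) := by
  unfold Spec_solve; infer_instance

-- ===== CLAIM (what is proved, stated in full; the proofs are below) =====
def Claim_equal_solve : Prop := ∀ (N : Int) (PS : List Int),
  Dom_solve N PS → Pre_solve N PS → Spec_solve N PS (solve N PS)

-- ===== LEMMAS AND PROOFS =====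

-- the children of node i as a pure function of the input
def childF (N : Int) (PS : List Int) (i : Int) : List Int :=
  (PySem.List.pyRange 1 N 1).filter (fun j => PySem.List.pyGetD PS j 0 = i)

-- the value (cost i, sign i) both programs compute, as a fuelled recursion
def specF (N : Int) (PS : List Int) : Nat → Int → Int × Int
  | 0, _ => (1, -1)
  | f+1, i => mergeB ((childF N PS i).map (specF N PS f))

def specN (N : Int) (PS : List Int) (i : Int) : Int × Int := specF N PS (N - i).toNat i

def lexB (a b : Int × Int) : Bool :=
  decide (a.1 < b.1) || (!decide (b.1 < a.1) && decide (a.2 < b.2))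

theorem insertBy_lexB_pairwise (x : Int × Int) (ys : List (Int × Int))
    (h : ys.Pairwise (fun a b => a.1 ≤ b.1)) :
    (PySem.List.insertBy lexB x ys).Pairwise (fun a b => a.1 ≤ b.1) := by
  induction ys with
  | nil => simp [PySem.List.insertBy]
  | cons y ys ih =>
    rw [PySem.List.insertBy]
    rcases List.pairwise_cons.mp h with ⟨hy, hys⟩
    by_cases hb : lexB x y = true
    · rw [if_pos hb]
      have hxy : x.1 ≤ y.1 := by
        simp only [lexB, Bool.or_eq_true, decide_eq_true_eq, Bool.and_eq_true,
          Bool.not_eq_true', decide_eq_false_iff_not] at hb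
        omega
      refine List.pairwise_cons.mpr ⟨?_, h⟩
      intro z hz
      rcases List.mem_cons.mp hz with rfl | hz
      · exact hxy
      · exact le_trans hxy (hy _ hz)
    · rw [if_neg hb]
      have hyx : y.1 ≤ x.1 := by
        simp only [lexB, Bool.or_eq_true, decide_eq_true_eq, Bool.and_eq_true,
          Bool.not_eq_true', decide_eq_false_iff_not] at hb
        omega
      refine List.pairwise_cons.mpr ⟨?_, ih hys⟩
      intro z hz
      rcases (PySem.List.mem_insertBy _ _ _ _).mp hz with rfl | hz
      · exact hyx
      · exact hy _ hz

theorem foldl_insertBy_lexB_pairwise (xs : List (Int × Int)) : ∀ (acc : List (Int × Int)),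
    acc.Pairwise (fun a b => a.1 ≤ b.1) →
    (xs.foldl (fun acc x => PySem.List.insertBy lexB x acc) acc).Pairwise
      (fun a b => a.1 ≤ b.1) := by
  induction xs with
  | nil => intro acc h; simpa using h
  | cons x xs ih => intro acc h; exact ih _ (insertBy_lexB_pairwise x acc h)

theorem sorted2_eq_foldl (xs : List (Int × Int)) :
    PySem.List.sorted2 xs (·.1) (·.2) false
      = xs.foldl (fun acc x => PySem.List.insertBy lexB x acc) [] := rfl

theorem sorted2_pairwise_fst (cs : List (Int × Int)) :
    (PySem.List.sorted2 cs (·.1) (·.2) false).Pairwise (fun a b => a.1 ≤ b.1) := by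
  rw [sorted2_eq_foldl]
  exact foldl_insertBy_lexB_pairwise cs [] (by simp)

theorem negs_eq (cs : List (Int × Int)) :
    PySem.List.sorted ((cs.filter (fun p => p.2 = -1)).map (·.1)) (fun c => c) false
      = ((PySem.List.sorted2 cs (·.1) (·.2) false).filter (fun p => p.2 = -1)).map (·.1) := by
  apply PySem.List.sorted_id_eq_of_perm_of_pairwise
  · exact ((PySem.List.sorted2_perm cs _ _ false).filter _).map _
  · exact ((sorted2_pairwise_fst cs).filter _).map _ (fun a b h => h)

theorem sum_filter_sorted2 (cs : List (Int × Int)) (p : Int × Int → Bool) :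
    (((PySem.List.sorted2 cs (·.1) (·.2) false).filter p).map (·.1)).sum
      = ((cs.filter p).map (·.1)).sum := by
  exact (((PySem.List.sorted2_perm cs _ _ false).filter p).map _).sum_eq

theorem pass1_eq (l : List (Int × Int)) : ∀ (a : Int × Int),
    l.foldl (fun (a : Int × Int) p => if p.2 = 1 ∧ p.1 < 0 then (a.1 + a.2 * p.1, a.2) else a) a
      = (a.1 + a.2 * ((l.filter (fun p => p.2 = 1 ∧ p.1 < 0)).map (·.1)).sum, a.2) := by
  induction l with
  | nil => intro a; simp
  | cons x l ih =>
    intro a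
    by_cases hx : x.2 = 1 ∧ x.1 < 0
    · simp [List.filter_cons, hx, ih]
      ring
    · simp [List.filter_cons, hx, ih]

theorem pass3_eq (l : List (Int × Int)) : ∀ (a : Int × Int),
    l.foldl (fun (a : Int × Int) p => if p.2 = 1 ∧ 0 ≤ p.1 then (a.1 + a.2 * p.1, a.2) else a) a
      = (a.1 + a.2 * ((l.filter (fun p => p.2 = 1 ∧ 0 ≤ p.1)).map (·.1)).sum, a.2) := by
  induction l with
  | nil => intro a; simp
  | cons x l ih =>
    intro a
    by_cases hx : x.2 = 1 ∧ 0 ≤ x.1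
    · simp [List.filter_cons, hx, ih]
      ring
    · simp [List.filter_cons, hx, ih]

theorem pass2_eq (l : List (Int × Int)) : ∀ (a : Int × Int),
    l.foldl (fun (a : Int × Int) p => if p.2 = -1 then (a.1 + a.2 * p.1, a.2 * (-1)) else a) a
      = ((l.filter (fun p => p.2 = -1)).map (·.1)).foldl
          (fun (a : Int × Int) c => (a.1 + a.2 * c, -a.2)) a := by
  induction l with
  | nil => intro a; simp
  | cons x l ih =>
    intro a
    by_cases hx : x.2 = -1
    · simp only [List.foldl_cons, List.filter_cons, hx, decide_true, if_true, List.map_cons,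
        List.foldl_cons, ih]
      have : (a.2 * (-1) : Int) = -a.2 := by ring
      rw [this]
    · simp only [List.foldl_cons, List.filter_cons, hx, decide_false, Bool.false_eq_true,
        if_false]
      exact ih a

theorem threepass_eq_mergeB (cs : List (Int × Int)) :
    (let a1 := (PySem.List.sorted2 cs (·.1) (·.2)).foldl
        (fun (a : Int × Int) p => if p.2 = 1 ∧ p.1 < 0 then (a.1 + a.2 * p.1, a.2) else a) (0, 1)
     let a2 := (PySem.List.sorted2 cs (·.1) (·.2)).foldl
        (fun (a : Int × Int) p => if p.2 = -1 then (a.1 + a.2 * p.1, a.2 * (-1)) else a) a1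
     let a3 := (PySem.List.sorted2 cs (·.1) (·.2)).foldl
        (fun (a : Int × Int) p => if p.2 = 1 ∧ 0 ≤ p.1 then (a.1 + a.2 * p.1, a.2) else a) a2
     ((a3.1 + 1, -a3.2) : Int × Int))
      = mergeB cs := by
  simp only [mergeB, pass1_eq, pass3_eq, pass2_eq, negs_eq, sum_filter_sorted2]
  norm_num

theorem mergeB_nil : mergeB [] = (1, -1) := by decide

theorem mergeB_single (c s : Int) (hs : s = 1 ∨ s = -1) :
    mergeB [(c, s)] = (c + 1, s * (-1)) := by
  rcases hs with rfl | rfl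
  · rcases lt_or_ge c 0 with hc | hc
    · simp [mergeB, hc, PySem.List.sorted, not_le.mpr hc]
    · simp [mergeB, not_lt.mpr hc, hc, PySem.List.sorted]
  · simp [mergeB, PySem.List.sorted, PySem.List.insertBy]

theorem altfold_sign (l : List Int) : ∀ (a : Int × Int), (a.2 = 1 ∨ a.2 = -1) →
    (l.foldl (fun (a : Int × Int) c => (a.1 + a.2 * c, -a.2)) a).2 = 1 ∨
    (l.foldl (fun (a : Int × Int) c => (a.1 + a.2 * c, -a.2)) a).2 = -1 := by
  induction l with
  | nil => intro a h; simpa using h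
  | cons x l ih => intro a h; exact ih _ (by rcases h with h | h <;> simp [h])

theorem mergeB_sign (cs : List (Int × Int)) : (mergeB cs).2 = 1 ∨ (mergeB cs).2 = -1 := by
  have := altfold_sign
    (PySem.List.sorted ((cs.filter (fun p => p.2 = -1)).map (·.1)) (fun c => c) false)
    (((cs.filter (fun p => p.2 = 1 ∧ p.1 < 0)).map (·.1)).sum, 1) (Or.inl rfl)
  have h2 : (mergeB cs).2 = -(List.foldl (fun (a : Int × Int) c => (a.1 + a.2 * c, -a.2))
      (((cs.filter (fun p => p.2 = 1 ∧ p.1 < 0)).map (·.1)).sum, 1)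
      (PySem.List.sorted ((cs.filter (fun p => p.2 = -1)).map (·.1)) (fun c => c) false)).2 := rfl
  rcases this with h | h
  · right; rw [h2, h]
  · left; rw [h2, h]; norm_num

theorem mem_childF (N : Int) (PS : List Int) (i j : Int) :
    j ∈ childF N PS i ↔ (1 ≤ j ∧ j < N ∧ PySem.List.pyGetD PS j 0 = i) := by
  simp [childF, PySem.List.mem_pyRange_one, and_assoc]

theorem childF_gt (N : Int) (PS : List Int) (hPre : Pre_solve N PS) (i j : Int)
    (hi : i < N) (hj : j ∈ childF N PS i) : i < j := by
  rcases (mem_childF N PS i j).mp hj with ⟨h1, h2, h3⟩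
  have := hPre.2.2 j (by rw [PySem.List.mem_pyRange_one]; omega)
  omega

theorem specF_sign (N : Int) (PS : List Int) (f : Nat) (i : Int) :
    (specF N PS f i).2 = 1 ∨ (specF N PS f i).2 = -1 := by
  cases f with
  | zero => right; rfl
  | succ f => exact mergeB_sign _

theorem specF_stable (N : Int) (PS : List Int) (hPre : Pre_solve N PS) :
    ∀ (d : Nat) (i : Int) (f f' : Nat), i < N →
      (N - i).toNat ≤ d → (N - i).toNat ≤ f → (N - i).toNat ≤ f' →
      specF N PS f i = specF N PS f' i := by
  intro d
  induction d with
  | zero => intro i f f' hi hd hf hf'; omega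
  | succ d ih =>
    intro i f f' hi hd hf hf'
    rcases Nat.eq_zero_or_pos (N - i).toNat with h0 | hpos
    · omega
    obtain ⟨f1, rfl⟩ : ∃ f1, f = f1 + 1 := ⟨f - 1, by omega⟩
    obtain ⟨f1', rfl⟩ : ∃ f1', f' = f1' + 1 := ⟨f' - 1, by omega⟩
    simp only [specF]
    congr 1
    apply List.map_congr_left
    intro j hj
    have hij : i < j := childF_gt N PS hPre i j hi hj
    have hjN : j < N := ((mem_childF N PS i j).mp hj).2.1
    exact ih j f1 f1' hjN (by omega) (by omega) (by omega)

theorem specN_eq_mergeB (N : Int) (PS : List Int) (hPre : Pre_solve N PS) (i : Int)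
    (hi : i < N) :
    specN N PS i = mergeB ((childF N PS i).map (fun j => specN N PS j)) := by
  have h1 : (N - i).toNat = ((N - i).toNat - 1) + 1 := by omega
  rw [specN, h1]
  simp only [specF]
  congr 1
  apply List.map_congr_left
  intro j hj
  have hij : i < j := childF_gt N PS hPre i j hi hj
  have hjN : j < N := ((mem_childF N PS i j).mp hj).2.1
  exact specF_stable N PS hPre (N - j).toNat j _ _ hjN (le_refl _) (by omega) (le_refl _)

theorem buildA_getD (PS : List Int) : ∀ (k : Nat) (i : Int),
    ((PySem.List.pyRange 1 (1 + (k : Int)) 1).foldl (buildA PS) PySem.Dict.empty).getD i []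
      = (PySem.List.pyRange 1 (1 + (k : Int)) 1).filter
          (fun j => PySem.List.pyGetD PS j 0 = i) := by
  intro k
  induction k with
  | zero =>
    intro i
    simp [PySem.List.pyRange_one_eq_nil, PySem.Dict.getD, PySem.Dict.get?, PySem.Dict.empty]
  | succ k ih =>
    intro i
    have hcast : (1 + ((k + 1 : Nat) : Int)) = (1 + (k : Int)) + 1 := by push_cast; ring
    rw [hcast, PySem.List.pyRange_one_succ_right (by omega), List.foldl_append,
      List.filter_append]
    simp only [List.foldl_cons, List.foldl_nil, List.filter_cons, List.filter_nil]
    rw [buildA]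
    rw [PySem.Dict.getD_insert]
    by_cases hip : i = PySem.List.pyGetD PS (1 + (k : Int)) 0
    · rw [if_pos hip, ih, hip]
      simp
    · rw [if_neg hip, ih]
      have h2 : ¬ (PySem.List.pyGetD PS (1 + (k : Int)) 0 = i) := fun h => hip h.symm
      simp [h2]

theorem childrenA_eq (N : Int) (PS : List Int) (hN : 1 ≤ N) (i : Int) :
    ((PySem.List.pyRange 1 N 1).foldl (buildA PS) PySem.Dict.empty).getD i []
      = childF N PS i := by
  have h : N = 1 + ((N - 1).toNat : Int) := by omega
  rw [childF, h]
  exact buildA_getD PS (N - 1).toNat i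

theorem stepA_correct (N : Int) (PS : List Int) (hPre : Pre_solve N PS)
    (children : PySem.Dict Int (List Int))
    (hch : ∀ i, children.getD i [] = childF N PS i)
    (st : PySem.Dict Int Int × PySem.Dict Int Int) (k : Int) (hkN : k < N)
    (hst1 : ∀ x, k < x → x < N → st.1.getD x 0 = (specN N PS x).1)
    (hst2 : ∀ x, k < x → x < N → st.2.getD x 0 = (specN N PS x).2) :
    stepA children st k = (st.1.insert k (specN N PS k).1, st.2.insert k (specN N PS k).2) := by
  have hspec := specN_eq_mergeB N PS hPre k hkN
  rw [stepA, hch k]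
  cases hc : childF N PS k with
  | nil =>
    rw [if_pos (by simp [hc])]
    rw [hc] at hspec
    simp only [List.map_nil, mergeB_nil] at hspec
    rw [hspec]
  | cons x tl =>
    cases tl with
    | nil =>
      rw [if_neg (by simp [hc]), if_pos (by simp [hc])]
      have hx : x ∈ childF N PS k := by rw [hc]; simp
      have hkx : k < x := childF_gt N PS hPre k x hkN hx
      have hxN : x < N := ((mem_childF N PS k x).mp hx).2.1
      have hget : PySem.List.pyGetD [x] (0 : Int) (0 : Int) = x := by
        simp [PySem.List.pyGetD, PySem.List.pyIdx?]
      rw [hc] at hspec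
      simp only [List.map_cons, List.map_nil] at hspec
      have hm := mergeB_single (specN N PS x).1 (specN N PS x).2
        (specF_sign N PS (N - x).toNat x)
      rw [Prod.mk.eta] at hm
      simp only []
      rw [hget, hst1 x hkx hxN, hst2 x hkx hxN, hspec, hm]
    | cons y tl2 =>
      rw [if_neg (by simp [hc]), if_neg (by simp [hc])]
      have hmap : (x :: y :: tl2).map (fun j => (st.1.getD j 0, st.2.getD j 0))
          = (x :: y :: tl2).map (fun j => specN N PS j) := by
        apply List.map_congr_left
        intro j hj
        have hjc : j ∈ childF N PS k := by rw [hc]; exact hj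
        have hkj : k < j := childF_gt N PS hPre k j hkN hjc
        have hjN : j < N := ((mem_childF N PS k j).mp hjc).2.1
        rw [hst1 j hkj hjN, hst2 j hkj hjN]
      rw [hc] at hspec
      have hth := threepass_eq_mergeB ((x :: y :: tl2).map (fun j => specN N PS j))
      simp only [] at hth
      have h1 := congrArg Prod.fst hth
      have h2 := congrArg Prod.snd hth
      simp only [] at h1 h2
      simp only []
      rw [hmap, h1, h2, hspec]

theorem loopA (N : Int) (PS : List Int) (hPre : Pre_solve N PS)
    (children : PySem.Dict Int (List Int))
    (hch : ∀ i, children.getD i [] = childF N PS i) :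
    ∀ (m : Nat), (m : Int) ≤ N →
      ∀ i, N - (m : Int) ≤ i → i < N →
        (((PySem.List.pyRange (N - (m : Int)) N 1).reverse.foldl (stepA children)
            (PySem.Dict.empty, PySem.Dict.empty)).1.getD i 0 = (specN N PS i).1 ∧
         ((PySem.List.pyRange (N - (m : Int)) N 1).reverse.foldl (stepA children)
            (PySem.Dict.empty, PySem.Dict.empty)).2.getD i 0 = (specN N PS i).2) := by
  intro m
  induction m with
  | zero => intro hm i h1 h2; omega
  | succ m ih =>
    intro hm i h1 h2
    have hk : N - ((m + 1 : Nat) : Int) < N := by push_cast; omega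
    rw [PySem.List.pyRange_one_cons hk, List.reverse_cons, List.foldl_append]
    simp only [List.foldl_cons, List.foldl_nil]
    have hcast : N - ((m + 1 : Nat) : Int) + 1 = N - ((m : Nat) : Int) := by push_cast; ring
    rw [hcast]
    set st := (PySem.List.pyRange (N - (m : Int)) N 1).reverse.foldl (stepA children)
      (PySem.Dict.empty, PySem.Dict.empty) with hst
    have hstep := stepA_correct N PS hPre children hch st (N - ((m + 1 : Nat) : Int)) hk
      (fun x hx1 hx2 => (ih (by omega) x (by push_cast at hx1 ⊢; omega) hx2).1)
      (fun x hx1 hx2 => (ih (by omega) x (by push_cast at hx1 ⊢; omega) hx2).2)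
    rw [hstep]
    by_cases hik : i = N - ((m + 1 : Nat) : Int)
    · subst hik
      constructor <;> simp [PySem.Dict.getD_insert]
    · have hi' : N - (m : Int) ≤ i := by push_cast at h1 ⊢; omega
      rw [PySem.Dict.getD_insert, PySem.Dict.getD_insert, if_neg hik, if_neg hik]
      exact ih (by omega) i hi' h2

-- ----- B-side proof machinery: post-order DFS correctness -----

-- the dict updates the DFS performs on the subtree of v, in execution (post-)order
def postE (N : Int) (PS : List Int) : Nat → Int → List Int
  | 0, _ => []
  | d+1, v => ((childF N PS v).reverse).flatMap (postE N PS d) ++ [v]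

-- insert specN values for every node of l, in order
def updL (N : Int) (PS : List Int) (l : List Int) (val : PySem.Dict Int (Int × Int)) :
    PySem.Dict Int (Int × Int) :=
  l.foldl (fun d u => d.insert u (specN N PS u)) val

theorem getD_updL (N : Int) (PS : List Int) : ∀ (l : List Int)
    (val : PySem.Dict Int (Int × Int)) (k : Int),
    (updL N PS l val).getD k (0, 0)
      = if k ∈ l then specN N PS k else val.getD k (0, 0) := by
  intro l
  induction l with
  | nil => intro val k; simp [updL]
  | cons x t ih =>
    intro val k
    have : updL N PS (x :: t) val = updL N PS t (val.insert x (specN N PS x)) := rfl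
    rw [this, ih]
    by_cases hkt : k ∈ t
    · rw [if_pos hkt, if_pos (by simp [hkt])]
    · rw [if_neg hkt, PySem.Dict.getD_insert]
      by_cases hkx : k = x
      · subst hkx
        rw [if_pos rfl, if_pos (by simp)]
      · rw [if_neg hkx, if_neg (by simp [hkx, hkt])]

theorem updL_append (N : Int) (PS : List Int) (l1 l2 : List Int)
    (val : PySem.Dict Int (Int × Int)) :
    updL N PS (l1 ++ l2) val = updL N PS l2 (updL N PS l1 val) := by
  simp [updL, List.foldl_append]

-- 'w is an ancestor of u' along the parent chain, fuelled
def isAnc (N : Int) (PS : List Int) : Nat → Int → Int → Prop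
  | 0, w, u => u = w
  | f+1, w, u => u = w ∨ (1 ≤ u ∧ u < N ∧ isAnc N PS f w (PySem.List.pyGetD PS u 0))

theorem anc_refl (N : Int) (PS : List Int) (f : Nat) (w : Int) : isAnc N PS f w w := by
  cases f with
  | zero => rfl
  | succ f => exact Or.inl rfl

theorem anc_le (N : Int) (PS : List Int) (hPre : Pre_solve N PS) :
    ∀ (f : Nat) (u w : Int), 0 ≤ w → w < N → isAnc N PS f w u → w ≤ u ∧ u < N := by
  intro f
  induction f with
  | zero =>
    intro u w h0 hN h
    rw [isAnc] at h
    subst h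
    exact ⟨le_refl _, hN⟩
  | succ f ih =>
    intro u w h0 hN h
    rw [isAnc] at h
    rcases h with rfl | ⟨h1, h2, hrec⟩
    · exact ⟨le_refl _, hN⟩
    · have hp := ih _ w h0 hN hrec
      have := hPre.2.2 u (by rw [PySem.List.mem_pyRange_one]; omega)
      omega

theorem anc_step (N : Int) (PS : List Int) :
    ∀ (f : Nat) (u v w : Int), w ∈ childF N PS v → isAnc N PS f w u →
      isAnc N PS (f+1) v u := by
  intro f
  induction f with
  | zero =>
    intro u v w hw h
    rw [isAnc] at h
    rcases (mem_childF N PS v w).mp hw with ⟨h1, h2, h3⟩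
    rw [h, isAnc]
    exact Or.inr ⟨h1, h2, by rw [h3, isAnc]⟩
  | succ f ih =>
    intro u v w hw h
    rw [isAnc] at h
    rcases h with h' | ⟨h1, h2, hrec⟩
    · rcases (mem_childF N PS v w).mp hw with ⟨h1, h2, h3⟩
      rw [h', isAnc]
      exact Or.inr ⟨h1, h2, by rw [h3]; exact anc_refl N PS (f+1) v⟩
    · rw [isAnc]
      exact Or.inr ⟨h1, h2, ih _ v w hw hrec⟩

theorem mem_postE_anc (N : Int) (PS : List Int) :
    ∀ (d : Nat) (v u : Int), u ∈ postE N PS d v → isAnc N PS d v u := by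
  intro d
  induction d with
  | zero => intro v u h; simp [postE] at h
  | succ d ih =>
    intro v u h
    rw [postE] at h
    rcases List.mem_append.mp h with h | h
    · rcases List.mem_flatMap.mp h with ⟨w, hw, hu⟩
      exact anc_step N PS d u v w (List.mem_reverse.mp hw) (ih w u hu)
    · have huv : u = v := by simpa using h
      rw [huv]
      exact anc_refl N PS (d+1) v

theorem siblings_disjoint (N : Int) (PS : List Int) (hPre : Pre_solve N PS) :
    ∀ (n : Nat) (u : Int), u.toNat ≤ n →
      ∀ (f g : Nat) (v w1 w2 : Int), w1 ∈ childF N PS v → w2 ∈ childF N PS v → w1 ≠ w2 →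
        isAnc N PS f w1 u → isAnc N PS g w2 u → False := by
  intro n
  induction n with
  | zero =>
    intro u hu f g v w1 w2 hw1 hw2 hne h1 h2
    rcases (mem_childF N PS v w1).mp hw1 with ⟨hb1, hbN1, _⟩
    have := anc_le N PS hPre f u w1 (by omega) hbN1 h1
    omega
  | succ n ihn =>
    intro u hu f g v w1 w2 hw1 hw2 hne h1 h2
    rcases (mem_childF N PS v w1).mp hw1 with ⟨hb1, hbN1, hps1⟩
    rcases (mem_childF N PS v w2).mp hw2 with ⟨hb2, hbN2, hps2⟩
    have hu1 := anc_le N PS hPre f u w1 (by omega) hbN1 h1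
    have hu2 := anc_le N PS hPre g u w2 (by omega) hbN2 h2
    by_cases he1 : u = w1
    · -- the chain to w2 must pass through par u = v, but w2 ≤ v < w2
      cases g with
      | zero => rw [isAnc] at h2; omega
      | succ g =>
        rw [isAnc] at h2
        rcases h2 with he2 | ⟨_, _, hrec⟩
        · omega
        · rw [he1, hps1] at hrec
          have hv := anc_le N PS hPre g v w2 (by omega) hbN2 hrec
          have : v < w2 := childF_gt N PS hPre v w2 hv.2 hw2
          omega
    · by_cases he2 : u = w2
      · cases f with
        | zero => rw [isAnc] at h1; omega
        | succ f =>
          rw [isAnc] at h1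
          rcases h1 with he1' | ⟨_, _, hrec⟩
          · omega
          · rw [he2, hps2] at hrec
            have hv := anc_le N PS hPre f v w1 (by omega) hbN1 hrec
            have : v < w1 := childF_gt N PS hPre v w1 hv.2 hw1
            omega
      · cases f with
        | zero => rw [isAnc] at h1; omega
        | succ f =>
          cases g with
          | zero => rw [isAnc] at h2; omega
          | succ g =>
            rw [isAnc] at h1 h2
            rcases h1 with he1' | ⟨hc1, hc2, hr1⟩
            · omega
            rcases h2 with he2' | ⟨_, _, hr2⟩
            · omega
            have hple := anc_le N PS hPre f (PySem.List.pyGetD PS u 0) w1 (by omega) hbN1 hr1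
            have hpar := hPre.2.2 u (by rw [PySem.List.mem_pyRange_one]; omega)
            exact ihn (PySem.List.pyGetD PS u 0) (by omega) f g v w1 w2 hw1 hw2 hne hr1 hr2

theorem postE_bounds (N : Int) (PS : List Int) (hPre : Pre_solve N PS) (d : Nat)
    (v u : Int) (h0 : 0 ≤ v) (hN : v < N) (h : u ∈ postE N PS d v) : v ≤ u ∧ u < N :=
  anc_le N PS hPre d u v h0 hN (mem_postE_anc N PS d v u h)

theorem postE_nodup (N : Int) (PS : List Int) (hPre : Pre_solve N PS) :
    ∀ (d : Nat) (v : Int), 0 ≤ v → v < N → (postE N PS d v).Nodup := by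
  intro d
  induction d with
  | zero => intro v _ _; simp [postE]
  | succ d ih =>
    intro v h0 hN
    rw [postE]
    rw [List.nodup_append]
    refine ⟨?_, by simp, ?_⟩
    · rw [List.nodup_flatMap]
      constructor
      · intro w hw
        rcases (mem_childF N PS v w).mp (List.mem_reverse.mp hw) with ⟨h1, h2, _⟩
        exact ih w (by omega) h2
      · have hnd : ((childF N PS v).reverse).Nodup :=
          (List.nodup_reverse).mpr ((PySem.List.nodup_pyRange_one 1 N).filter _)
        refine List.Pairwise.imp_of_mem ?_ hnd
        intro a b ha hb hab
        intro u hua hub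
        exact siblings_disjoint N PS hPre u.toNat u (le_refl _) d d v a b
          (List.mem_reverse.mp ha) (List.mem_reverse.mp hb) hab
          (mem_postE_anc N PS d a u hua) (mem_postE_anc N PS d b u hub)
    · intro u hu b hb
      have hbv : b = v := by simpa using hb
      rcases List.mem_flatMap.mp hu with ⟨w, hw, huw⟩
      have hwc := List.mem_reverse.mp hw
      rcases (mem_childF N PS v w).mp hwc with ⟨h1, h2, _⟩
      have hb2 := postE_bounds N PS hPre d w u (by omega) h2 huw
      have hvw : v < w := childF_gt N PS hPre v w hN hwc
      omega

theorem postE_length (N : Int) (PS : List Int) (hPre : Pre_solve N PS) (d : Nat)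
    (v : Int) (h0 : 0 ≤ v) (hN : v < N) : (postE N PS d v).length ≤ (N - v).toNat := by
  have hsub : postE N PS d v ⊆ PySem.List.pyRange v N 1 := by
    intro u hu
    have := postE_bounds N PS hPre d v u h0 hN hu
    rw [PySem.List.mem_pyRange_one]
    omega
  have := (List.subperm_of_subset (postE_nodup N PS hPre d v h0 hN) hsub).length_le
  rwa [PySem.List.length_pyRange_one] at this

theorem postE_self_mem (N : Int) (PS : List Int) (d : Nat) (v : Int) :
    v ∈ postE N PS (d+1) v := by
  rw [postE]
  simp

theorem runB_subtree (N : Int) (PS : List Int) (hPre : Pre_solve N PS)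
    (children : PySem.Dict Int (List Int))
    (hch : ∀ i, children.getD i [] = childF N PS i) :
    ∀ (d : Nat) (v : Int), 0 ≤ v → v < N → (N - v).toNat ≤ d →
      ∀ (f : Nat) (rest : List (Int × Bool)) (val : PySem.Dict Int (Int × Int)),
        2 * (postE N PS d v).length ≤ f →
        runB children f ((v, false) :: rest) val
          = runB children (f - 2 * (postE N PS d v).length) rest
              (updL N PS (postE N PS d v) val) := by
  intro d
  induction d with
  | zero => intro v h0 hN hd; omega
  | succ d ih =>
    intro v h0 hN hd f rest val hf
    have hlen : (postE N PS (d+1) v).length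
        = (((childF N PS v).reverse).flatMap (postE N PS d)).length + 1 := by
      rw [postE]; simp
    obtain ⟨f0, rfl⟩ : ∃ f0, f = f0 + 1 := ⟨f - 1, by omega⟩
    have hstep1 : runB children (f0 + 1) ((v, false) :: rest) val
        = runB children f0
            ((((childF N PS v).reverse).map (fun w => (w, false))) ++ (v, true) :: rest) val := by
      rw [runB, if_neg (by simp), hch v]
    rw [hstep1]
    -- process the children frames one subtree at a time
    have inner : ∀ (ws : List Int), (∀ w ∈ ws, w ∈ childF N PS v) →
        ∀ (f : Nat) (rest : List (Int × Bool)) (val : PySem.Dict Int (Int × Int)),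
          2 * (ws.flatMap (postE N PS d)).length ≤ f →
          runB children f (ws.map (fun w => (w, false)) ++ rest) val
            = runB children (f - 2 * (ws.flatMap (postE N PS d)).length) rest
                (updL N PS (ws.flatMap (postE N PS d)) val) := by
      intro ws
      induction ws with
      | nil => intro _ f rest val _; simp [updL]
      | cons w ws ihw =>
        intro hmem f rest val hf
        have hw := hmem w (List.mem_cons_self ..)
        rcases (mem_childF N PS v w).mp hw with ⟨hw1, hwN, _⟩
        have hvw : v < w := childF_gt N PS hPre v w hN hw
        have hdw : (N - w).toNat ≤ d := by omega
        have hL : ((w :: ws).flatMap (postE N PS d)).length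
            = (postE N PS d w).length + (ws.flatMap (postE N PS d)).length := by
          simp
        rw [List.map_cons, List.cons_append]
        rw [ih w (by omega) hwN hdw f (ws.map (fun w => (w, false)) ++ rest) val
          (by omega)]
        rw [ihw (fun x hx => hmem x (List.mem_cons_of_mem _ hx)) _ rest _ (by omega)]
        have hfl : (w :: ws).flatMap (postE N PS d)
            = postE N PS d w ++ ws.flatMap (postE N PS d) := by simp
        rw [hfl, updL_append]
        congr 1
        simp only [List.length_append]
        omega
    have hsum := inner ((childF N PS v).reverse)
      (fun w hw => List.mem_reverse.mp hw) f0 ((v, true) :: rest) val (by omega)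
    rw [hsum]
    set FM := ((childF N PS v).reverse).flatMap (postE N PS d) with hFM
    obtain ⟨f1, hf1⟩ : ∃ f1, f0 - 2 * FM.length = f1 + 1 := ⟨f0 - 2 * FM.length - 1, by omega⟩
    rw [hf1, runB, if_pos rfl]
    have hvals : stepDone children (updL N PS FM val) v
        = (updL N PS FM val).insert v (specN N PS v) := by
      rw [stepDone, hch v]
      congr 1
      have hmapc : (childF N PS v).map (fun w => (updL N PS FM val).getD w (0, 0))
          = (childF N PS v).map (fun j => specN N PS j) := by
        apply List.map_congr_left
        intro w hwc
        rcases (mem_childF N PS v w).mp hwc with ⟨hw1, hwN, _⟩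
        have hvw2 : v < w := childF_gt N PS hPre v w hN hwc
        have hwFM : w ∈ FM := by
          rw [hFM]
          refine List.mem_flatMap.mpr ⟨w, List.mem_reverse.mpr hwc, ?_⟩
          obtain ⟨d', rfl⟩ : ∃ d', d = d' + 1 := ⟨d - 1, by omega⟩
          exact postE_self_mem N PS d' w
        rw [getD_updL, if_pos hwFM]
      rw [hmapc, ← specN_eq_mergeB N PS hPre v hN]
    rw [hvals]
    have hupd : (updL N PS FM val).insert v (specN N PS v)
        = updL N PS (postE N PS (d+1) v) val := by
      rw [postE, ← hFM, updL_append]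
      rfl
    rw [hupd]
    congr 1
    omega

theorem solve_alt_eq (N : Int) (PS : List Int) (hPre : Pre_solve N PS) :
    solve_alt N PS = PySem.Int.floordiv (N + (specN N PS 0).1) 2 := by
  have hN : 1 ≤ N := hPre.1
  have hch := childrenA_eq N PS hN
  have hd : (N - 0).toNat ≤ N.toNat := by omega
  have hlen := postE_length N PS hPre N.toNat 0 (le_refl _) (by omega)
  have hrun := runB_subtree N PS hPre _ hch N.toNat 0 (le_refl _) (by omega) hd
    (2 * N.toNat + 2) [] PySem.Dict.empty (by omega)
  simp only [solve_alt]
  rw [hrun]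
  have hempty : ∀ (f : Nat), runB ((PySem.List.pyRange 1 N 1).foldl (buildA PS)
      PySem.Dict.empty) f [] (updL N PS (postE N PS N.toNat 0) PySem.Dict.empty)
      = updL N PS (postE N PS N.toNat 0) PySem.Dict.empty := by
    intro f; cases f <;> rfl
  rw [hempty]
  obtain ⟨d', hd'⟩ : ∃ d', N.toNat = d' + 1 := ⟨N.toNat - 1, by omega⟩
  have h0 : (0 : Int) ∈ postE N PS N.toNat 0 := by
    rw [hd']; exact postE_self_mem N PS d' 0
  rw [getD_updL, if_pos h0]

-- ===== VERDICT (by name: the statement is the Claim_ definition above) =====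
theorem solve_spec : Claim_equal_solve := by
  intro N PS hDom hPre
  unfold Spec_solve
  have hN : 1 ≤ N := hPre.1
  have hA := (loopA N PS hPre _ (childrenA_eq N PS hN) N.toNat (by omega) 0 (by omega)
    (by omega)).1
  have hzero : N - (N.toNat : Int) = 0 := by omega
  rw [hzero] at hA
  simp only [solve]
  rw [hA, solve_alt_eq N PS hPre]
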